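-- pv_equiv track=rewrite | github.com/ryongseong/programmers | CodingTest/인사고과/인사고과_solution.py | solution
-- ===== SOURCE A (Python) =====
-- def solution(scores):
--     wanho = scores[0] # 완호의 점수는 0번째 인덱스에 있는 값들임
--     wanho_sum = sum(wanho)
--     scores.sort(key=lambda s: (-s[0], s[1])) # 0번 인덱스를 기준으로 내림차순, 1번 인덱스를 기준으로 오름차순을 함.
--     max_company = 0 # 가장 높은 점수는 0으로 초깃값 할당
--     answer = 1 # 등수는 1부터 시작하므로 1로 초깃값 할당
--     for s in scores:
--         if wanho[0] < s[0] and wanho[1] < s[1]: # 근무 태도와 동료 평가 둘 다 비교함. 한번이라도 두 점수 모두 낮은 경우가 한번이라도 있다면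
--             return -1                           # 바로 return -1을 함.
--         if max_company <= s[1]:                 # 0번 인덱스를 기준으로 내림차순을 했기 때문에 1번 인덱스를 비교함. 1번 인덱스의 값이 그 이전 사원이 1번 인덱스보다 작다면 조건 1에 만족을 하지 않으므로 패스함.
--             if wanho_sum < s[0] + s[1]:         # 인센티브를 받을 수 있으므로 이제 완호의 등수를 매김
--                 answer += 1                     # 완호보다 총합이 높다면 등수가 높으므로 완호의 등수는 1씩 내려감
--             max_company = s[1]                  # 이제 1번 인덱스를 다시 선언해줌.
--     return answer                               # 등수를 리턴함.
-- ===== SOURCE B (Python) =====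
-- def solution(scores):
--     wanho = scores[0]
--     wanho_sum = sum(wanho)
--     if any(s[0] > wanho[0] and s[1] > wanho[1] for s in scores):
--         return -1
--     answer = 1
--     for s in scores:
--         if s[0] + s[1] > wanho_sum and s[1] >= max([0] + [t[1] for t in scores if t[0] > s[0]]):
--             answer += 1
--     return answer
-- ===== Notes on version B (the rewrite author's own statement) =====
-- stated objective: alternative
-- what changed: Replaces A's sort + fused running-max single pass with direct nested scans: B returns -1 if anyone strictly dominates wanho, else counts employees with total above wanho's whose company score reaches the incentive threshold max([0] + [t[1] for higher-attitude t]); B does not sort and does not mutate the input list.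
import Mathlib
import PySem

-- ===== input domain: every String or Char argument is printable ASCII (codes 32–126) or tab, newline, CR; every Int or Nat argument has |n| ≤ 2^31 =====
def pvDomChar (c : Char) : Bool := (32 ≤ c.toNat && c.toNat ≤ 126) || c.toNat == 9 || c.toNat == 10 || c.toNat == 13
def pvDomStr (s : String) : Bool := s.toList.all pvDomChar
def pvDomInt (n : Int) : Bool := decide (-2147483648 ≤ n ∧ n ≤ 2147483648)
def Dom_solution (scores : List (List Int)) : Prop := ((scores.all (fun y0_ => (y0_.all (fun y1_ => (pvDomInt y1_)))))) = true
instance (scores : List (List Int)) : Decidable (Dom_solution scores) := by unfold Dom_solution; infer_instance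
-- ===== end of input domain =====

-- B replaces A's sort + fused running-max pass by direct nested domination scans; return-value
-- equivalence only: A sorts `scores` in place (B does not mutate its argument).


-- s[0] and s[1]; in range under Pre_solution (outside it Python raises IndexError)
def g0 (s : List Int) : Int := PySem.List.pyGetD s 0 0
def g1 (s : List Int) : Int := PySem.List.pyGetD s 1 0

-- `t[0] > s[0] and t[1] > s[1]`: t strictly dominates s (both comparisons of A's and B's tests)
def domB (s t : List Int) : Bool := decide (g0 s < g0 t) && decide (g1 s < g1 t)

-- ===== PORT A =====
-- the `for s in scores` loop of A: early `return -1`, running max_company, answer counter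
def solutionLoop (wanho : List Int) (wsum maxc ans : Int) : List (List Int) → Int
  | [] => ans
  | s :: rest =>
    if domB wanho s then -1
    else if maxc ≤ g1 s then
      solutionLoop wanho wsum (g1 s) (if wsum < g0 s + g1 s then ans + 1 else ans) rest
    else solutionLoop wanho wsum maxc ans rest

def solution (scores : List (List Int)) : Int :=
  let wanho := PySem.List.pyGetD scores 0 []        -- scores[0]
  let wanhoSum := wanho.sum                          -- sum(wanho)
  let sorted := PySem.List.sorted2 scores (fun s => -(g0 s)) g1   -- scores.sort(key=lambda s: (-s[0], s[1]))
  solutionLoop wanho wanhoSum 0 1 sorted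

-- ===== PORT B =====
def solution_alt (scores : List (List Int)) : Int :=
  let wanho := PySem.List.pyGetD scores 0 []
  let wanhoSum := wanho.sum
  if scores.any (fun s => domB wanho s) then -1
  else
    scores.foldl (fun answer s =>
      if decide (wanhoSum < g0 s + g1 s) &&
         decide (((scores.filter (fun t => decide (g0 s < g0 t))).map g1).foldl max 0 ≤ g1 s)
      then answer + 1 else answer) 1

-- ===== PRECONDITION & SPEC =====
-- exactly where Python A returns: scores[0] and every s[0], s[1] must exist (else IndexError)
def Pre_solution (scores : List (List Int)) : Prop :=
  scores ≠ [] ∧ ∀ s ∈ scores, 2 ≤ s.length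
instance (scores : List (List Int)) : Decidable (Pre_solution scores) := by
  unfold Pre_solution; infer_instance

def pvWitness_solution : List (List Int) := [[1, 2], [3, 4]]

def Spec_solution (scores : List (List Int)) (out : Int) : Prop := out = solution_alt scores
instance (scores : List (List Int)) (out : Int) : Decidable (Spec_solution scores out) := by
  unfold Spec_solution; infer_instance

-- ===== CLAIM (what is proved, stated in full; the proofs are below) =====
def Claim_equal_solution : Prop := ∀ (scores : List (List Int)), Dom_solution scores → Pre_solution scores → Spec_solution scores (solution scores)

-- ===== LEMMAS AND PROOFS =====

-- strict lexicographic "less" of A's sort key (-s[0], s[1])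
def ltB (a b : List Int) : Bool :=
  decide (-(g0 a) < -(g0 b)) || (!decide (-(g0 b) < -(g0 a)) && decide (g1 a < g1 b))

-- "a may come before b" in the sorted order: key a ≤ key b
def keyle (a b : List Int) : Prop := ltB b a = false

theorem sorted2_eq_foldl (scores : List (List Int)) :
    PySem.List.sorted2 scores (fun s => -(g0 s)) g1 =
      scores.foldl (fun acc x => PySem.List.insertBy ltB x acc) [] := rfl

theorem ltB_asymm {a b : List Int} (h : ltB a b = true) : ltB b a = false := by
  simp [ltB] at *; omega

theorem ltB_trans {a b c : List Int} (h1 : ltB a b = true) (h2 : ltB b c = true) :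
    ltB a c = true := by
  simp [ltB] at *; omega

theorem insertBy_pairwise (x : List Int) (acc : List (List Int))
    (h : acc.Pairwise keyle) : (PySem.List.insertBy ltB x acc).Pairwise keyle := by
  induction acc with
  | nil => simp [PySem.List.insertBy]
  | cons y ys ih =>
    rcases List.pairwise_cons.mp h with ⟨hy, hys⟩
    by_cases hb : ltB x y = true
    · rw [PySem.List.insertBy, if_pos hb]
      refine List.pairwise_cons.mpr ⟨?_, List.pairwise_cons.mpr ⟨hy, hys⟩⟩
      intro z hz
      rcases List.mem_cons.mp hz with rfl | hz
      · exact ltB_asymm hb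
      · -- keyle x z : ltB z x = false
        have hyz := hy z hz
        by_contra hzx
        have hzx' : ltB z x = true := by
          cases hgood : ltB z x with
          | false => exact absurd hgood hzx
          | true => rfl
        exact absurd (ltB_trans hzx' hb) (by simp [keyle] at hyz; simp [hyz])
    · rw [PySem.List.insertBy, if_neg hb]
      refine List.pairwise_cons.mpr ⟨?_, ih hys⟩
      intro z hz
      rcases (PySem.List.mem_insertBy ltB x z ys).mp hz with rfl | hz
      · simpa [keyle] using hb
      · exact hy z hz

theorem foldl_insertBy_pairwise (l : List (List Int)) :
    ∀ acc : List (List Int), acc.Pairwise keyle →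
      (l.foldl (fun acc x => PySem.List.insertBy ltB x acc) acc).Pairwise keyle := by
  induction l with
  | nil => intro acc h; simpa using h
  | cons x xs ih =>
    intro acc h
    exact ih _ (insertBy_pairwise x acc h)

theorem sorted2_pairwise_keyle (scores : List (List Int)) :
    (PySem.List.sorted2 scores (fun s => -(g0 s)) g1).Pairwise keyle := by
  rw [sorted2_eq_foldl]
  exact foldl_insertBy_pairwise scores [] (by simp)

-- early return -1
theorem loop_dom (wanho : List Int) (wsum : Int) :
    ∀ (l : List (List Int)) (maxc ans : Int),
      (∃ s ∈ l, domB wanho s = true) →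
      solutionLoop wanho wsum maxc ans l = -1 := by
  intro l
  induction l with
  | nil => intro maxc ans h; simp at h
  | cons s rest ih =>
    intro maxc ans h
    by_cases hs : domB wanho s = true
    · simp [solutionLoop, hs]
    · have h' : ∃ t ∈ rest, domB wanho t = true := by
        rcases h with ⟨t, ht, hd⟩
        rcases List.mem_cons.mp ht with rfl | ht
        · exact absurd hd hs
        · exact ⟨t, ht, hd⟩
      rw [solutionLoop, if_neg hs]
      by_cases hm : maxc ≤ g1 s
      · rw [if_pos hm]; exact ih _ _ h'
      · rw [if_neg hm]; exact ih _ _ h'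

-- pure count mirroring the loop
def cntA (wsum : Int) (maxc : Int) : List (List Int) → Int
  | [] => 0
  | s :: rest =>
    if maxc ≤ g1 s then
      (if wsum < g0 s + g1 s then 1 else 0) + cntA wsum (g1 s) rest
    else cntA wsum maxc rest

theorem loop_no_dom (wanho : List Int) (wsum : Int) :
    ∀ (l : List (List Int)) (maxc ans : Int),
      (∀ s ∈ l, domB wanho s = false) →
      solutionLoop wanho wsum maxc ans l = ans + cntA wsum maxc l := by
  intro l
  induction l with
  | nil => intro maxc ans _; simp [solutionLoop, cntA]
  | cons s rest ih =>
    intro maxc ans h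
    have hs : ¬ domB wanho s = true := by simp [h s (List.mem_cons_self ..)]
    have hrest : ∀ t ∈ rest, domB wanho t = false :=
      fun t ht => h t (List.mem_cons_of_mem _ ht)
    rw [solutionLoop, if_neg hs, cntA]
    by_cases hm : maxc ≤ g1 s
    · rw [if_pos hm, if_pos hm, ih _ _ hrest]
      by_cases hw : wsum < g0 s + g1 s <;> simp [hw] <;> ring
    · rw [if_neg hm, if_neg hm, ih _ _ hrest]

-- no t in l strictly dominates s
def noDom (l : List (List Int)) (s : List Int) : Bool :=
  !(l.any (fun t => domB s t))

theorem noDom_cons (a : List Int) (l : List (List Int)) (s : List Int) :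
    noDom (a :: l) s = (!(domB s a) && noDom l s) := by
  simp [noDom, List.any_cons, Bool.not_or]

theorem cntA_eq_countP (wsum : Int) :
    ∀ (l : List (List Int)), l.Pairwise keyle → ∀ maxc : Int,
      cntA wsum maxc l =
        ((l.countP (fun s => decide (maxc ≤ g1 s) && decide (wsum < g0 s + g1 s) && noDom l s) : Nat) : Int) := by
  intro l
  induction l with
  | nil => intro _ maxc; simp [cntA]
  | cons s rest ih =>
    intro hp maxc
    rcases List.pairwise_cons.mp hp with ⟨hs, hrest⟩
    have hkey : ∀ t ∈ rest, keyle s t := hs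
    -- s is not dominated inside s :: rest
    have hnds : noDom (s :: rest) s = true := by
      rw [noDom_cons]
      have h1 : domB s s = false := by simp [domB]
      have h2 : noDom rest s = true := by
        simp only [noDom, Bool.not_eq_true', List.any_eq_false]
        intro t ht
        have := hkey t ht
        simp [keyle, ltB] at this
        simp [domB]
        omega
      simp [h1, h2]
    rw [cntA]
    by_cases hm : maxc ≤ g1 s
    · rw [if_pos hm, ih hrest (g1 s)]
      have hcong : rest.countP (fun t => decide (g1 s ≤ g1 t) && decide (wsum < g0 t + g1 t) && noDom rest t)
          = rest.countP (fun t => decide (maxc ≤ g1 t) && decide (wsum < g0 t + g1 t) && noDom (s :: rest) t) := by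
        apply List.countP_congr
        intro t ht
        have hk := hkey t ht
        simp [keyle, ltB] at hk
        cases hnd : noDom rest t with
        | false => simp [noDom_cons, hnd]
        | true =>
          simp only [noDom_cons, hnd, Bool.and_true]
          simp only [domB, Bool.and_eq_true, Bool.not_eq_true', Bool.and_eq_false_iff,
            decide_eq_true_eq, decide_eq_false_iff_not]
          omega
      rw [hcong, List.countP_cons]
      have : (decide (maxc ≤ g1 s) && decide (wsum < g0 s + g1 s) && noDom (s :: rest) s)
          = decide (wsum < g0 s + g1 s) := by
        simp [hm, hnds]
      rw [this]
      by_cases hw : wsum < g0 s + g1 s <;> simp [hw] <;> push_cast <;> ring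
    · rw [if_neg hm, ih hrest maxc, List.countP_cons]
      have hhead : (decide (maxc ≤ g1 s) && decide (wsum < g0 s + g1 s) && noDom (s :: rest) s) = false := by
        simp [hm]
      rw [hhead]
      have hcong : rest.countP (fun t => decide (maxc ≤ g1 t) && decide (wsum < g0 t + g1 t) && noDom rest t)
          = rest.countP (fun t => decide (maxc ≤ g1 t) && decide (wsum < g0 t + g1 t) && noDom (s :: rest) t) := by
        apply List.countP_congr
        intro t ht
        cases hnd : noDom rest t with
        | false => simp [noDom_cons, hnd]
        | true =>
          simp only [noDom_cons, hnd, Bool.and_true]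
          simp only [domB, Bool.and_eq_true, Bool.not_eq_true', Bool.and_eq_false_iff,
            decide_eq_true_eq, decide_eq_false_iff_not]
          omega
      rw [hcong]
      simp

-- noDom over a permutation
theorem noDom_perm {l l' : List (List Int)} (h : l.Perm l') (s : List Int) :
    noDom l s = noDom l' s := by
  simp only [noDom]
  congr 1
  apply Bool.eq_iff_iff.mpr
  simp only [List.any_eq_true]
  constructor
  · rintro ⟨t, ht, hd⟩; exact ⟨t, h.mem_iff.mp ht, hd⟩
  · rintro ⟨t, ht, hd⟩; exact ⟨t, h.mem_iff.mpr ht, hd⟩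

-- B's counting loop is a countP
theorem foldl_count (q : List Int → Bool) :
    ∀ (l : List (List Int)) (init : Int),
      l.foldl (fun answer s => if q s then answer + 1 else answer) init
        = init + ((l.countP q : Nat) : Int) := by
  intro l
  induction l with
  | nil => intro init; simp
  | cons s rest ih =>
    intro init
    rw [List.foldl_cons, List.countP_cons]
    by_cases hq : q s = true <;> simp [hq, ih] <;> push_cast <;> ring

-- the common unfolding: in the no-(-1) case both sides are 1 + a countP over scores
theorem solution_eq_count (scores : List (List Int))
    (hnd : ∀ t ∈ scores, domB (PySem.List.pyGetD scores 0 []) t = false) :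
    solution scores = 1 + ((scores.countP (fun s =>
        decide (0 ≤ g1 s) && decide ((PySem.List.pyGetD scores 0 []).sum < g0 s + g1 s) && noDom scores s) : Nat) : Int) := by
  set w := PySem.List.pyGetD scores 0 [] with hw
  have hperm : (PySem.List.sorted2 scores (fun s => -(g0 s)) g1).Perm scores :=
    PySem.List.sorted2_perm ..
  have hnd' : ∀ t ∈ PySem.List.sorted2 scores (fun s => -(g0 s)) g1,
      domB w t = false := fun t ht => hnd t (hperm.mem_iff.mp ht)
  show solutionLoop w w.sum 0 1 _ = _
  rw [loop_no_dom _ _ _ _ _ hnd',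
      cntA_eq_countP _ _ (sorted2_pairwise_keyle scores) 0]
  congr 1
  have hcong : (PySem.List.sorted2 scores (fun s => -(g0 s)) g1).countP
        (fun s => decide ((0:Int) ≤ g1 s) && decide (w.sum < g0 s + g1 s) && noDom (PySem.List.sorted2 scores (fun s => -(g0 s)) g1) s)
      = (PySem.List.sorted2 scores (fun s => -(g0 s)) g1).countP
        (fun s => decide ((0:Int) ≤ g1 s) && decide (w.sum < g0 s + g1 s) && noDom scores s) := by
    apply List.countP_congr
    intro t _
    rw [noDom_perm hperm]
  rw [hcong, hperm.countP_eq]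

theorem fold_max_le_iff :
    ∀ (l : List Int) (init v : Int), l.foldl max init ≤ v ↔ (init ≤ v ∧ ∀ x ∈ l, x ≤ v) := by
  intro l
  induction l with
  | nil => intro init v; simp
  | cons x t ih =>
    intro init v
    rw [List.foldl_cons, ih]
    constructor
    · rintro ⟨h1, h2⟩
      refine ⟨by omega, fun y hy => ?_⟩
      rcases List.mem_cons.mp hy with rfl | hy
      · omega
      · exact h2 y hy
    · rintro ⟨h1, h2⟩
      have hx := h2 x (List.mem_cons_self ..)
      exact ⟨by omega, fun y hy => h2 y (List.mem_cons_of_mem _ hy)⟩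

theorem solution_alt_eq_count (scores : List (List Int))
    (hnd : ∀ t ∈ scores, domB (PySem.List.pyGetD scores 0 []) t = false) :
    solution_alt scores = 1 + ((scores.countP (fun s =>
        decide ((PySem.List.pyGetD scores 0 []).sum < g0 s + g1 s) &&
        decide (((scores.filter (fun t => decide (g0 s < g0 t))).map g1).foldl max 0 ≤ g1 s)) : Nat) : Int) := by
  set w := PySem.List.pyGetD scores 0 [] with hw
  have hany : scores.any (fun s => domB w s) = false := by
    simp only [List.any_eq_false]
    intro t ht
    simp [hnd t ht]
  show (if scores.any (fun s => domB w s) = true then (-1:Int) else _) = _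
  rw [hany]
  simp only [Bool.false_eq_true, if_false]
  rw [foldl_count]

-- ===== VERDICT (by name: the statement is the Claim_ definition above) =====
theorem solution_spec : Claim_equal_solution := by
  intro scores _ hpre
  show solution scores = solution_alt scores
  by_cases hdom : ∃ t ∈ scores, domB (PySem.List.pyGetD scores 0 []) t = true
  · -- both return -1
    set w := PySem.List.pyGetD scores 0 [] with hw
    have hA : solution scores = -1 := by
      have hperm : (PySem.List.sorted2 scores (fun s => -(g0 s)) g1).Perm scores :=
        PySem.List.sorted2_perm ..
      rcases hdom with ⟨t, ht, hd⟩
      exact loop_dom _ _ _ _ _ ⟨t, hperm.mem_iff.mpr ht, hd⟩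
    have hB : solution_alt scores = -1 := by
      have hany : scores.any (fun s => domB w s) = true := by
        simp only [List.any_eq_true]
        exact hdom
      show (if scores.any (fun s => domB w s) = true then (-1:Int) else _) = -1
      rw [hany]; simp
    rw [hA, hB]
  · have hnd : ∀ t ∈ scores, domB (PySem.List.pyGetD scores 0 []) t = false := by
      intro t ht
      cases h : domB (PySem.List.pyGetD scores 0 []) t with
      | false => rfl
      | true => exact absurd ⟨t, ht, h⟩ hdom
    rw [solution_eq_count scores hnd, solution_alt_eq_count scores hnd]
    congr 2
    apply List.countP_congr
    intro s _
    have hthr : (((scores.filter (fun t => decide (g0 s < g0 t))).map g1).foldl max 0 ≤ g1 s)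
        ↔ ((0:Int) ≤ g1 s ∧ ∀ t ∈ scores, g0 s < g0 t → g1 t ≤ g1 s) := by
      rw [fold_max_le_iff]
      simp only [List.mem_map, List.mem_filter, decide_eq_true_eq]
      constructor
      · rintro ⟨h0, h2⟩
        exact ⟨h0, fun t ht hgt => h2 (g1 t) ⟨t, ⟨ht, hgt⟩, rfl⟩⟩
      · rintro ⟨h0, h2⟩
        exact ⟨h0, by rintro y ⟨t, ⟨ht, hgt⟩, rfl⟩; exact h2 t ht hgt⟩
    have hnodiff : noDom scores s = true ↔ (∀ t ∈ scores, g0 s < g0 t → g1 t ≤ g1 s) := by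
      simp only [noDom, Bool.not_eq_true', List.any_eq_false, domB]
      constructor
      · intro h t ht hgt
        have := h t ht
        simp only [Bool.and_eq_true, decide_eq_true_eq, not_and] at this
        have := this hgt
        omega
      · intro h t ht
        simp only [Bool.and_eq_true, decide_eq_true_eq, not_and]
        intro hgt
        have := h t ht hgt
        omega
    cases hnd2 : noDom scores s with
    | true =>
      have h2 := hnodiff.mp hnd2
      have h3 : decide (((scores.filter (fun t => decide (g0 s < g0 t))).map g1).foldl max 0 ≤ g1 s)
          = decide ((0:Int) ≤ g1 s) := by
        by_cases h0 : (0:Int) ≤ g1 s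
        · simp [hthr.mpr ⟨h0, h2⟩, h0]
        · have : ¬ (((scores.filter (fun t => decide (g0 s < g0 t))).map g1).foldl max 0 ≤ g1 s) :=
            fun hc => h0 (hthr.mp hc).1
          simp [this, h0]
      rw [h3]
      cases h0 : decide ((0:Int) ≤ g1 s) <;> cases hw : decide ((PySem.List.pyGetD scores 0 []).sum < g0 s + g1 s) <;> simp
    | false =>
      have h2 : ¬ ∀ t ∈ scores, g0 s < g0 t → g1 t ≤ g1 s :=
        fun hc => by rw [hnodiff.mpr hc] at hnd2; cases hnd2
      have h3 : decide (((scores.filter (fun t => decide (g0 s < g0 t))).map g1).foldl max 0 ≤ g1 s) = false := by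
        have : ¬ (((scores.filter (fun t => decide (g0 s < g0 t))).map g1).foldl max 0 ≤ g1 s) :=
          fun hc => h2 (hthr.mp hc).2
        simp [this]
      rw [h3]
      simp
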